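-- pv_equiv track=rewrite | github.com/samayunPathan/leetcode-programming-practise | 2490_circle_sentence.py | circle_s
-- ===== SOURCE A (Python) =====
-- def circle_s(s):
--     s=s.split(' ');c=0;i=0
--     l=len(s)
--     if l<2:
--         if s[0][0]==s[0][-1]:
--             return True
--     else:
--         i=0
--         while i<l-1:
--             if s[i][-1]==s[i+1][0]:
--                 c+=1
--             i+=1
--     return c==l-1 and s[0][0]==s[-1][-1]
-- ===== SOURCE B (Python) =====
-- def circle_s(s):
--     words = s.split(' ')
--     rotated = words[1:] + words[:1]
--     c = 0
--     for w, r in zip(words, rotated):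
--         if w[-1] == r[0]:
--             c += 1
--     return c == len(words)
-- ===== Notes on version B (the rewrite author's own statement) =====
-- stated objective: simpler
-- what changed: B replaces A's three-way structure (special-case for a single word, an index-driven while loop over adjacent pairs, plus a separate first/last-letter closing check) by one uniform count over zip(words, rotated) with rotated = words[1:]+words[:1], so the closing pair is just another pair and the length-1 case needs no branch.
-- outside the precondition, e.g. on circle_s(' '): A raises IndexError, B raises IndexError
import Mathlib
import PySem

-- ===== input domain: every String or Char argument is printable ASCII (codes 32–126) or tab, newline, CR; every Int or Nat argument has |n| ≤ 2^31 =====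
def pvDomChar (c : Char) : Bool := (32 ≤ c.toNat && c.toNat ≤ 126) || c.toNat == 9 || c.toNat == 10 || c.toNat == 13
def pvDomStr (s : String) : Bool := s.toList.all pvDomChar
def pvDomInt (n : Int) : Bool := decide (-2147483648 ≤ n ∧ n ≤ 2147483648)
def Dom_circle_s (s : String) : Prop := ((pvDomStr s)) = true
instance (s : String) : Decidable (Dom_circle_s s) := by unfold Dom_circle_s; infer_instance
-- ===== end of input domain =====

set_option maxHeartbeats 1000000


-- B folds A's single-word special case, adjacent-pair while loop and separate wrap check into one
-- uniform count over zip(words, rotated); objective: simpler.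

-- w[j] on a word; the ' ' default is only reached where Python raises IndexError (outside Pre_)
def pvWordGet (w : String) (j : Int) : Char := (PySem.Str.pyGet? w j).getD ' '

-- ===== PORT A =====
def circle_s (s : String) : Bool :=
  let ws := (PySem.Str.split? s " ").getD []
  let l : Int := ws.length
  if l < 2 then
    if pvWordGet (PySem.List.pyGetD ws 0 "") 0 == pvWordGet (PySem.List.pyGetD ws 0 "") (-1) then
      true
    else
      decide ((0 : Int) = l - 1) &&
        (pvWordGet (PySem.List.pyGetD ws 0 "") 0 == pvWordGet (PySem.List.pyGetD ws (-1) "") (-1))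
  else
    let c := (PySem.List.pyRange 0 (l - 1) 1).foldl
      (fun c i =>
        if pvWordGet (PySem.List.pyGetD ws i "") (-1) == pvWordGet (PySem.List.pyGetD ws (i + 1) "") 0 then
          c + 1
        else c) (0 : Int)
    decide (c = l - 1) &&
      (pvWordGet (PySem.List.pyGetD ws 0 "") 0 == pvWordGet (PySem.List.pyGetD ws (-1) "") (-1))

-- ===== PORT B =====
def circle_s_alt (s : String) : Bool :=
  let ws := (PySem.Str.split? s " ").getD []
  let rotated := PySem.List.slice ws (some 1) none ++ PySem.List.slice ws none (some 1)
  let c := (ws.zip rotated).foldl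
    (fun c p => if pvWordGet p.1 (-1) == pvWordGet p.2 0 then c + 1 else c) (0 : Int)
  decide (c = (ws.length : Int))

-- ===== PRECONDITION & SPEC =====
-- Pre_ excludes exactly the inputs where Python A raises IndexError: some word of s.split(' ')
-- is empty (empty s, leading/trailing space, or two adjacent spaces); B raises there too.
def Pre_circle_s (s : String) : Prop := ∀ w ∈ (PySem.Str.split? s " ").getD [], w ≠ ""
instance (s : String) : Decidable (Pre_circle_s s) := by unfold Pre_circle_s; infer_instance

def pvWitness_circle_s : String := "ab ba"

def Spec_circle_s (s : String) (out : Bool) : Prop := out = circle_s_alt s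
instance (s : String) (out : Bool) : Decidable (Spec_circle_s s out) := by unfold Spec_circle_s; infer_instance

-- ===== CLAIM (what is proved, stated in full; the proofs are below) =====
def Claim_equal_circle_s : Prop := ∀ (s : String), Dom_circle_s s → Pre_circle_s s → Spec_circle_s s (circle_s s)

-- ===== LEMMAS AND PROOFS =====

theorem pvWordGet_comm (a b : String) :
    (pvWordGet a 0 == pvWordGet b (-1)) = (pvWordGet b (-1) == pvWordGet a 0) := by
  rw [Bool.eq_iff_iff]
  simp only [beq_iff_eq]
  exact eq_comm

theorem pv_zip_tail_eq (ws : List String) :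
    ws.zip ws.tail
      = (List.range (ws.length - 1)).map (fun k => (ws.getD k "", ws.getD (k + 1) "")) := by
  apply List.ext_getElem
  · simp [List.length_zip, List.length_tail]
  · intro i h1 h2
    have h1' : i < ws.length - 1 := by
      simpa [List.length_zip, List.length_tail] using h1
    have hi : i < ws.length := by omega
    have hi1 : i + 1 < ws.length := by omega
    simp [List.getElem_zip, List.getElem_tail, List.getD_eq_getElem?_getD,
      List.getElem?_eq_getElem hi, List.getElem?_eq_getElem hi1]

-- the while-loop count over range(l-1) equals the count over zip(ws, ws.tail)
theorem pv_countA (ws : List String) :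
    (PySem.List.pyRange 0 ((ws.length : Int) - 1) 1).foldl
      (fun c i =>
        if pvWordGet (PySem.List.pyGetD ws i "") (-1)
            == pvWordGet (PySem.List.pyGetD ws (i + 1) "") 0 then c + 1 else c) (0 : Int)
    = ((ws.zip ws.tail).countP
        (fun p => pvWordGet p.1 (-1) == pvWordGet p.2 0) : Int) := by
  set P : Int → Bool := fun i =>
      pvWordGet (PySem.List.pyGetD ws i "") (-1) == pvWordGet (PySem.List.pyGetD ws (i + 1) "") 0
    with hP
  rw [PySem.List.foldl_if_add_one P, zero_add]
  have hr : PySem.List.pyRange 0 ((ws.length : Int) - 1) 1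
      = List.map (fun k : Nat => (k : Int)) (List.range (ws.length - 1)) := by
    rw [PySem.List.pyRange_one]
    have ht : ((ws.length : Int) - 1 - 0).toNat = ws.length - 1 := by omega
    rw [ht]
    apply List.map_congr_left
    intro k _
    omega
  rw [hr, List.countP_map, pv_zip_tail_eq, List.countP_map]
  congr 1
  apply List.countP_congr
  intro k hk
  simp only [List.mem_range] at hk
  simp only [Function.comp, hP]
  have e2 : ((k : Nat) : Int) + 1 = (((k + 1 : Nat)) : Int) := by push_cast; ring
  rw [e2, PySem.List.pyGetD_natCast, PySem.List.pyGetD_natCast]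

theorem pv_zip_wrap (t : List String) : ∀ (a x : String),
    (a :: t).zip (t ++ [x]) = (a :: t).zip t ++ [((a :: t).getLast (by simp), x)] := by
  induction t with
  | nil => intro a x; simp
  | cons b t' ih =>
    intro a x
    simp only [List.cons_append, List.zip_cons_cons]
    rw [ih b x]
    simp [List.getLast_cons]

theorem pv_main (ws : List String) :
    (let l : Int := ws.length
     if l < 2 then
       if pvWordGet (PySem.List.pyGetD ws 0 "") 0 == pvWordGet (PySem.List.pyGetD ws 0 "") (-1) then
         true
       else
         decide ((0 : Int) = l - 1) &&
           (pvWordGet (PySem.List.pyGetD ws 0 "") 0 == pvWordGet (PySem.List.pyGetD ws (-1) "") (-1))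
     else
       let c := (PySem.List.pyRange 0 (l - 1) 1).foldl
         (fun c i =>
           if pvWordGet (PySem.List.pyGetD ws i "") (-1)
               == pvWordGet (PySem.List.pyGetD ws (i + 1) "") 0 then c + 1 else c) (0 : Int)
       decide (c = l - 1) &&
         (pvWordGet (PySem.List.pyGetD ws 0 "") 0 == pvWordGet (PySem.List.pyGetD ws (-1) "") (-1)))
    =
    (let rotated := PySem.List.slice ws (some 1) none ++ PySem.List.slice ws none (some 1)
     let c := (ws.zip rotated).foldl
       (fun c p => if pvWordGet p.1 (-1) == pvWordGet p.2 0 then c + 1 else c) (0 : Int)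
     decide (c = (ws.length : Int))) := by
  match ws with
  | [] => decide
  | [a] =>
    rw [PySem.List.slice_from_one, PySem.List.slice_to _ (by norm_num : (0:Int) ≤ 1)]
    by_cases h : pvWordGet a (-1) = pvWordGet a 0
    · simp [PySem.List.pyGetD, PySem.List.pyGet?, PySem.List.pyIdx?, h]
    · have h' : ¬ (pvWordGet a 0 = pvWordGet a (-1)) := fun e => h e.symm
      simp [PySem.List.pyGetD, PySem.List.pyGet?, PySem.List.pyIdx?, h, h']
  | a :: b :: t =>
    have hlen : (2 : Int) ≤ ((a :: b :: t).length : Int) := by simp; omega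
    simp only []
    rw [if_neg (by omega)]
    rw [PySem.List.slice_from_one, PySem.List.slice_to _ (by norm_num : (0:Int) ≤ 1)]
    have htake : List.take (1:Int).toNat (a :: b :: t) = [a] := by simp
    rw [htake, List.tail_cons]
    rw [pv_zip_wrap (b :: t) a a]
    rw [List.foldl_append]
    rw [PySem.List.foldl_if_add_one
      (fun p : String × String => pvWordGet p.1 (-1) == pvWordGet p.2 0)]
    rw [PySem.List.foldl_if_add_one
      (fun p : String × String => pvWordGet p.1 (-1) == pvWordGet p.2 0)]
    rw [zero_add, pv_countA]
    simp only [List.tail_cons]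
    set L := ((a :: b :: t).getLast (by simp : (a :: b :: t) ≠ [])) with hL
    set n : Nat := (a :: b :: t).length with hn
    set cnt : Nat := ((a :: b :: t).zip (b :: t)).countP
        (fun p => pvWordGet p.1 (-1) == pvWordGet p.2 0) with hcnt
    have hzl : ((a :: b :: t).zip (b :: t)).length = n - 1 := by
      simp [List.length_zip, hn]
    have hle : cnt ≤ n - 1 := by
      have h := List.countP_le_length
        (p := fun p : String × String => pvWordGet p.1 (-1) == pvWordGet p.2 0)
        (l := (a :: b :: t).zip (b :: t))
      omega
    have hn2 : 2 ≤ n := by simp [hn]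
    have hget0 : PySem.List.pyGetD (a :: b :: t) 0 "" = a := by
      have h := PySem.List.pyGetD_natCast (a :: b :: t) 0 ""
      simpa using h
    have hgetm1 : PySem.List.pyGetD (a :: b :: t) (-1) "" = L := by
      have h := PySem.List.pyGetD_neg_natCast (a :: b :: t) 1 "" (by norm_num) (by simp)
      rw [hL, List.getLast_eq_getElem]
      simpa using h
    have hcp : (List.countP (fun p : String × String => pvWordGet p.1 (-1) == pvWordGet p.2 0)
        [(L, a)]) = (if (pvWordGet L (-1) == pvWordGet a 0) = true then 1 else 0) := by
      simp [List.countP_cons]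
    rw [hget0, hgetm1, pvWordGet_comm, hcp]
    by_cases hw : (pvWordGet L (-1) == pvWordGet a 0) = true
    · rw [hw, if_pos rfl, Bool.and_true]
      rw [decide_eq_decide]
      push_cast
      constructor <;> intro h <;> omega
    · rw [Bool.not_eq_true] at hw
      rw [hw, Bool.and_false, if_neg (by simp)]
      have hne : ¬ ((cnt : Int) + ((0 : Nat) : Int) = (n : Int)) := by push_cast; omega
      rw [decide_eq_false hne]

-- ===== VERDICT (by name: the statement is the Claim_ definition above) =====
theorem circle_s_spec : Claim_equal_circle_s := by
  intro s _ _
  unfold Spec_circle_s circle_s circle_s_alt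
  exact pv_main ((PySem.Str.split? s " ").getD [])
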